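-- pv_equiv track=rewrite | github.com/TheCubiq/Pohadka_o_chlebu | jdechleba.py | kdovsechnojde
-- ===== SOURCE A (Python) =====
-- doplnky = [
--   #s/se
--   "",
--   "máslem",
--   "salámem",
--   "kečupem",
--   #"lučinou",
--   #"marmeládou",
--   #"nutelou"
-- ]
--
-- potraviny = [
--   #  jde     povídá   potkají
--   ["chleba","chlebe"],                    #chleba
--   ["rohlík","rohlíku"],                   #rohlík
--   ["houska","housko","housku"],           #houska
--   ["veka","veko","veku"],                 #veka
--   ["loupák","loupáku"],                   #loupák
--   ["dalamánek","dalamánku"],              #dalamánek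
--   ["mazanec","mazanče"],                  #mazanec
--   ["vánočka","vánočko","vánočku"],        #vánočka
--   ["pletýnka","pletýnko","pletýnku"],     #pletýnka
--   ["toust","touste"],                     #toust
--   ["preclík","preclíku"],                 #preclík
--   ["tyčinka","tyčinko","tyčinku"],        #tyčka
--   ["bulka","bulko","bulku"],              #bulka
--   ["brioška","brioško","briošku"],        #brioška
--   ["bageta","bageto","bagetu"],           #bageta
--   ["beránek","beránku","beránka"],        #beránek
--   ["buchta","buchto","buchtu"],           #buchta
--   ["langoš","langoši"],                   #langoš
--   ["trdelník","trdelníku"],               #trdelník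
--   ["kobliha","kobliho","koblihu"],        #kobliha
--   ["krosant","krosante"],                 #krosant
--   ["donat","donate"],                     #donat
--   ["koláček","koláčku"],                  #koláček
--   ["krutónek","krutónku"],                #krutónky
--   ["krekr","krekře"],                     #krekry
--   ["čokorolka","čokorolko","čokorolku"],  #čokorolka
--   ["sušenka","sušenko","sušenku"],        #sušenky
--   ["perníček","perníčku"],                #perníček
--   ["očičko","očičko"],                    #očičko
--   ["piškot","piškote"],                   #piškot
--   ["zemlbába","zemlbábo","zemlbábu"],     #zemlbába
--   ["roláda","roládo","roládu"],           #roláda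
--   ["drdol","drdole"],                     #drdol
--   ["dukáta","dukátko","dukátku"],         #dukátky
--   ["šáteček","šátečku"],                  #šáteček
--   ["mafin","mafine"],                     #mafin
--   ["bochánek","bochánku"],                #bochánek
--   ["kaiserka","kaiserko","kaiserku"],     #keiserka
--   ["vdolek","vdolku"],                    #vdolek
--   ["placka","placko","placku"],           #placka
--   ["cebetka","cebetko","cebetku"],        #cebetka
--   ["cizrnka","cizrnko","cizrnku"],        #cizrnka
--   ["raženka","raženko","raženku"],        #raženka
--   ["uzel","uzle"],                        #uzel
--   ["štrůdl","štrůdle"],                   #štrůdl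
--   ["řepánek","řepánku"],                  #řepánek
--   ["bábovka","bábovko","bábovku"],        #bábovka
--   ["makovec","makovče"],                  #makovec
--   ["frgál","frgále"],                     #frgál
--   ["hvězdička","hvězdičko","hvězdičku"],  #hvězdička
-- ]
--
-- def se(s):
--   if len(s) != 0:
--     if s[:1] == "s":
--         return(f"se {s}")
--     else:
--         return(f"s {s}")
--   else:
--     return("")
--
-- def potrdopl(pozice,typ):
--   #potravina
--   pt = ""
--   d = potraviny[int(pozice/len(doplnky))]
--   if (typ == 2 and len(d) != 3):
--       pt = d[0]
--   else:
--       pt = d[typ]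
--
--   #doplněk
--   dp = ""
--   for i in range(int(pozice%(len(doplnky)))+1):
--     dp = f"{dp}{se(doplnky[i])} "
--
--   b = f"{pt}{dp}"
--   b = b[:len(b)-1]
--   return(b)
--
-- def kdovsechnojde(kolik,typ):
--   sezn = ""
--   for kdojde in range(kolik+1):
--       c = ""
--       if kdojde != kolik:
--         c=", "
--       sezn = sezn + (potrdopl(kdojde,typ)+c)
--   return(sezn)
-- ===== SOURCE B (Python) =====
-- doplnky = ["", "máslem", "salámem", "kečupem"]
--
-- potraviny = [
--   ["chleba","chlebe"],["rohlík","rohlíku"],["houska","housko","housku"],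
--   ["veka","veko","veku"],["loupák","loupáku"],["dalamánek","dalamánku"],
--   ["mazanec","mazanče"],["vánočka","vánočko","vánočku"],
--   ["pletýnka","pletýnko","pletýnku"],["toust","touste"],["preclík","preclíku"],
--   ["tyčinka","tyčinko","tyčinku"],["bulka","bulko","bulku"],
--   ["brioška","brioško","briošku"],["bageta","bageto","bagetu"],
--   ["beránek","beránku","beránka"],["buchta","buchto","buchtu"],
--   ["langoš","langoši"],["trdelník","trdelníku"],["kobliha","kobliho","koblihu"],
--   ["krosant","krosante"],["donat","donate"],["koláček","koláčku"],
--   ["krutónek","krutónku"],["krekr","krekře"],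
--   ["čokorolka","čokorolko","čokorolku"],["sušenka","sušenko","sušenku"],
--   ["perníček","perníčku"],["očičko","očičko"],["piškot","piškote"],
--   ["zemlbába","zemlbábo","zemlbábu"],["roláda","roládo","roládu"],
--   ["drdol","drdole"],["dukáta","dukátko","dukátku"],["šáteček","šátečku"],
--   ["mafin","mafine"],["bochánek","bochánku"],["kaiserka","kaiserko","kaiserku"],
--   ["vdolek","vdolku"],["placka","placko","placku"],
--   ["cebetka","cebetko","cebetku"],["cizrnka","cizrnko","cizrnku"],
--   ["raženka","raženko","raženku"],["uzel","uzle"],["štrůdl","štrůdle"],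
--   ["řepánek","řepánku"],["bábovka","bábovko","bábovku"],["makovec","makovče"],
--   ["frgál","frgále"],["hvězdička","hvězdičko","hvězdičku"],
-- ]
--
-- def kdovsechnojde(kolik, typ):
--     n = len(doplnky)
--     # suffix table: sufs[j] = concatenation of "se(doplnky[i]) " for i in 0..j
--     sufs, acc = [], ""
--     for d in doplnky:
--         acc += ((("se " if d[:1] == "s" else "s ") + d) if d else "") + " "
--         sufs.append(acc)
--     out = []
--     for p in range(kolik + 1):
--         d = potraviny[p // n]
--         w = d[0] if typ == 2 and len(d) != 3 else d[typ]
--         out.append((w + sufs[p % n])[:-1])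
--     return ", ".join(out)
-- ===== Notes on version B (the rewrite author's own statement) =====
-- stated objective: simpler
-- what changed: B precomputes the four cumulative topping suffixes once into a table, then builds each position's phrase by a single table lookup and joins them with ', '.join, replacing A's per-position inner rescan of doplnky and repeated string concatenation with trailing-comma bookkeeping.
import Mathlib
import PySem

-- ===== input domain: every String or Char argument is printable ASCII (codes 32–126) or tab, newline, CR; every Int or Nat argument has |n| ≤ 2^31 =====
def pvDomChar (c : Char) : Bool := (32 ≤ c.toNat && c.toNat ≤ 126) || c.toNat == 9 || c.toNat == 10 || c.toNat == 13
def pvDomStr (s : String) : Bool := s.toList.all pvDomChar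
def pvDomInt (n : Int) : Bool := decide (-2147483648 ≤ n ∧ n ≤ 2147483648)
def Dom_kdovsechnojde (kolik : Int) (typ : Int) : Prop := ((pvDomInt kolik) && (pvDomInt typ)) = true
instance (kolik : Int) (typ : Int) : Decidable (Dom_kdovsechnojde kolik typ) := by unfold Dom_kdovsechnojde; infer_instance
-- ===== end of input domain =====

-- B replaces A's per-position inner rescan of doplnky and O(n^2) string concatenation by a
-- build-once table of four cumulative topping suffixes plus one map/join pass (objective: simpler).

-- ===== PORT A =====
def doplnky : List String := ["", "máslem", "salámem", "kečupem"]

def potraviny : List (List String) := [  ["chleba","chlebe"],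
  ["rohlík","rohlíku"],
  ["houska","housko","housku"],
  ["veka","veko","veku"],
  ["loupák","loupáku"],
  ["dalamánek","dalamánku"],
  ["mazanec","mazanče"],
  ["vánočka","vánočko","vánočku"],
  ["pletýnka","pletýnko","pletýnku"],
  ["toust","touste"],
  ["preclík","preclíku"],
  ["tyčinka","tyčinko","tyčinku"],
  ["bulka","bulko","bulku"],
  ["brioška","brioško","briošku"],
  ["bageta","bageto","bagetu"],
  ["beránek","beránku","beránka"],
  ["buchta","buchto","buchtu"],
  ["langoš","langoši"],
  ["trdelník","trdelníku"],
  ["kobliha","kobliho","koblihu"],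
  ["krosant","krosante"],
  ["donat","donate"],
  ["koláček","koláčku"],
  ["krutónek","krutónku"],
  ["krekr","krekře"],
  ["čokorolka","čokorolko","čokorolku"],
  ["sušenka","sušenko","sušenku"],
  ["perníček","perníčku"],
  ["očičko","očičko"],
  ["piškot","piškote"],
  ["zemlbába","zemlbábo","zemlbábu"],
  ["roláda","roládo","roládu"],
  ["drdol","drdole"],
  ["dukáta","dukátko","dukátku"],
  ["šáteček","šátečku"],
  ["mafin","mafine"],
  ["bochánek","bochánku"],
  ["kaiserka","kaiserko","kaiserku"],
  ["vdolek","vdolku"],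
  ["placka","placko","placku"],
  ["cebetka","cebetko","cebetku"],
  ["cizrnka","cizrnko","cizrnku"],
  ["raženka","raženko","raženku"],
  ["uzel","uzle"],
  ["štrůdl","štrůdle"],
  ["řepánek","řepánku"],
  ["bábovka","bábovko","bábovku"],
  ["makovec","makovče"],
  ["frgál","frgále"],
  ["hvězdička","hvězdičko","hvězdičku"]]

def se (s : String) : String :=
  if PySem.Str.len s ≠ 0 then
    if PySem.Str.slice s none (some 1) = "s" then "se " ++ s else "s " ++ s
  else ""

-- list indexing is pyGet?; the 'none' (IndexError) cases are excluded by Pre_kdovsechnojde,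
-- so the .getD defaults are never reached on admitted inputs.
def potrdopl (pozice : Int) (typ : Int) : String :=
  let d := (PySem.List.pyGet? potraviny (PySem.Int.truncdiv pozice (doplnky.length : Int))).getD []
  let pt := if typ = 2 ∧ d.length ≠ 3 then (PySem.List.pyGet? d 0).getD ""
            else (PySem.List.pyGet? d typ).getD ""
  let dp := (PySem.List.pyRange 0 (PySem.Int.mod pozice (doplnky.length : Int) + 1)).foldl
      (fun dp i => dp ++ se ((PySem.List.pyGet? doplnky i).getD "") ++ " ") ""
  let b := pt ++ dp
  PySem.Str.slice b none (some (PySem.Str.len b - 1))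

def kdovsechnojde (kolik : Int) (typ : Int) : String :=
  (PySem.List.pyRange 0 (kolik + 1)).foldl
    (fun sezn kdojde =>
      let c := if kdojde ≠ kolik then ", " else ""
      sezn ++ (potrdopl kdojde typ ++ c)) ""

-- ===== PORT B =====
def kdovsechnojde_alt (kolik : Int) (typ : Int) : String :=
  let n := (doplnky.length : Int)
  let sufs := (doplnky.foldl (fun (st : List String × String) d =>
      let acc := st.2 ++ ((if d ≠ "" then
          (if PySem.Str.slice d none (some 1) = "s" then "se " else "s ") ++ d else "") ++ " ")
      (st.1 ++ [acc], acc)) ([], "")).1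
  let out := (PySem.List.pyRange 0 (kolik + 1)).map (fun p =>
      let d := (PySem.List.pyGet? potraviny (PySem.Int.floordiv p n)).getD []
      let w := if typ = 2 ∧ d.length ≠ 3 then (PySem.List.pyGet? d 0).getD ""
               else (PySem.List.pyGet? d typ).getD ""
      PySem.Str.slice (w ++ (PySem.List.pyGet? sufs (PySem.Int.mod p n)).getD "") none (some (-1)))
  PySem.Str.join ", " out

-- ===== PRECONDITION & SPEC =====
-- Pre_ excludes exactly the inputs where Python A raises IndexError: kolik ≥ 200 runs past the
-- 50-entry potraviny table, and for kolik ≥ 0 a typ outside -2..2 is an invalid word-form index.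
def Pre_kdovsechnojde (kolik : Int) (typ : Int) : Prop :=
  kolik < 200 ∧ (kolik < 0 ∨ (-2 ≤ typ ∧ typ ≤ 2))
instance (kolik : Int) (typ : Int) : Decidable (Pre_kdovsechnojde kolik typ) := by
  unfold Pre_kdovsechnojde; infer_instance

def pvWitness_kdovsechnojde : Int × Int := (5, 0)

def Spec_kdovsechnojde (kolik : Int) (typ : Int) (out : String) : Prop := out = kdovsechnojde_alt kolik typ
instance (kolik : Int) (typ : Int) (out : String) : Decidable (Spec_kdovsechnojde kolik typ out) := by unfold Spec_kdovsechnojde; infer_instance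

-- ===== CLAIM (what is proved, stated in full; the proofs are below) =====
def Claim_equal_kdovsechnojde : Prop := ∀ (kolik : Int) (typ : Int), Dom_kdovsechnojde kolik typ → Pre_kdovsechnojde kolik typ → Spec_kdovsechnojde kolik typ (kdovsechnojde kolik typ)

-- ===== LEMMAS AND PROOFS =====

-- the cumulative-suffix table B builds (one entry per doplnky prefix)
def sufTable : List String :=
  [" ", " s máslem ", " s máslem se salámem ", " s máslem se salámem s kečupem "]

lemma truncdiv_eq_floordiv_of_nonneg (a : Int) (h : 0 ≤ a) :
    PySem.Int.truncdiv a 4 = PySem.Int.floordiv a 4 := by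
  simp [PySem.Int.truncdiv, PySem.Int.floordiv, Int.tdiv_eq_ediv, Int.fdiv_eq_ediv, h]

-- u[:len(u)-1] and u[:-1] are the same string (both drop the last character; equal on "" too)
lemma slice_len_pred (u : String) :
    PySem.Str.slice u none (some (PySem.Str.len u - 1)) = PySem.Str.slice u none (some (-1)) := by
  rw [← String.toList_inj]
  simp only [PySem.Str.toList_slice, PySem.Chars.slice_eq_listSlice, PySem.Str.len_eq]
  rcases h : u.toList with _ | ⟨c, t⟩
  · rfl
  · rw [show ((c :: t).length : Int) - 1 = ((t.length : Nat) : Int) by simp,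
        PySem.List.slice_to_natCast, PySem.List.slice_to_neg_one]
    simp [List.dropLast_eq_take]

lemma strJoin_cons_cons (x y : String) (t : List String) :
    PySem.Str.join ", " (x :: y :: t) = x ++ ", " ++ PySem.Str.join ", " (y :: t) := by
  simp [PySem.Str.join, PySem.Chars.join_cons_cons]
  rw [← String.toList_inj]
  simp

lemma strJoin_singleton (x : String) : PySem.Str.join ", " [x] = x := by
  rw [← String.toList_inj]
  simp [PySem.Str.join, PySem.Chars.join_singleton]

-- A's comma-appending fold over l ++ [m] is ", ".join of the phrases, when m is the only endpoint
lemma foldl_join (l : List Int) (m : Int) (f : Int → String) (init : String)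
    (h : ∀ k ∈ l, k ≠ m) :
    (l ++ [m]).foldl (fun s k => s ++ (f k ++ if k ≠ m then ", " else "")) init
      = init ++ PySem.Str.join ", " ((l ++ [m]).map f) := by
  induction l generalizing init with
  | nil => simp [strJoin_singleton]
  | cons a t ih =>
    have ha : a ≠ m := h a (by simp)
    simp only [List.cons_append, List.foldl_cons, if_pos ha, List.map_cons]
    rw [ih _ (fun k hk => h k (List.mem_cons_of_mem _ hk))]
    obtain ⟨y, r, hyr⟩ : ∃ y r, (t ++ [m]).map f = y :: r := by cases t <;> simp
    rw [hyr, strJoin_cons_cons, ← String.append_assoc, ← String.append_assoc,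
        ← String.append_assoc]

-- the four concrete suffix strings: A's inner rescan at offset j equals B's table entry j
lemma dp_eq_sufTable (j : Int) (h0 : 0 ≤ j) (h4 : j < 4) :
    (PySem.List.pyRange 0 (j + 1)).foldl
        (fun dp i => dp ++ se ((PySem.List.pyGet? doplnky i).getD "") ++ " ") ""
      = (PySem.List.pyGet? sufTable j).getD "" := by
  have : j = 0 ∨ j = 1 ∨ j = 2 ∨ j = 3 := by omega
  rcases this with h | h | h | h <;> subst h <;> decide

-- per-position phrase equality: potrdopl p typ = B's table-lookup phrase at p
lemma phrase_eq (typ p : Int) (hp : 0 ≤ p) :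
    potrdopl p typ =
      PySem.Str.slice
        ((if typ = 2 ∧ ((PySem.List.pyGet? potraviny (PySem.Int.floordiv p 4)).getD []).length ≠ 3
          then (PySem.List.pyGet? ((PySem.List.pyGet? potraviny (PySem.Int.floordiv p 4)).getD []) 0).getD ""
          else (PySem.List.pyGet? ((PySem.List.pyGet? potraviny (PySem.Int.floordiv p 4)).getD []) typ).getD "")
         ++ (PySem.List.pyGet? sufTable (PySem.Int.mod p 4)).getD "") none (some (-1)) := by
  unfold potrdopl
  simp only [show ((doplnky.length : Nat) : Int) = 4 from by decide]
  rw [truncdiv_eq_floordiv_of_nonneg p hp]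
  rw [dp_eq_sufTable (PySem.Int.mod p 4) (PySem.Int.mod_nonneg p (by norm_num))
        (PySem.Int.mod_lt p (by norm_num)), slice_len_pred]

-- ===== VERDICT (by name: the statement is the Claim_ definition above) =====
theorem kdovsechnojde_spec : Claim_equal_kdovsechnojde := by
  intro kolik typ _ _
  unfold Spec_kdovsechnojde kdovsechnojde kdovsechnojde_alt
  have hsufs : (doplnky.foldl (fun (st : List String × String) d =>
      let acc := st.2 ++ ((if d ≠ "" then
          (if PySem.Str.slice d none (some 1) = "s" then "se " else "s ") ++ d else "") ++ " ")
      (st.1 ++ [acc], acc)) ([], "")).1 = sufTable := by decide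
  simp only [hsufs, show ((doplnky.length : Nat) : Int) = 4 from by decide]
  by_cases hk : 0 ≤ kolik
  · rw [PySem.List.pyRange_one_succ_right hk,
        foldl_join (PySem.List.pyRange 0 kolik) kolik (fun k => potrdopl k typ) ""
          (fun k hk' => by rw [PySem.List.mem_pyRange_one] at hk'; omega)]
    rw [String.empty_append]
    apply congrArg
    apply List.map_congr_left
    intro p hp
    have hp0 : 0 ≤ p := by
      rcases List.mem_append.mp hp with h | h
      · exact (PySem.List.mem_pyRange_one.mp h).1
      · simp at h; omega
    exact phrase_eq typ p hp0
  · rw [PySem.List.pyRange_one_eq_nil (by omega)]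
    simp [PySem.Str.join]
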